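-- pv_equiv track=rewrite | github.com/Ace1928/refactor_forge | transformer/import_manager.py | _resolve_circular_dependencies
-- ===== SOURCE A (Python) =====
-- from typing import Dict, List, Set, Any, Tuple
--
-- def _resolve_circular_dependencies(
--     module_imports: Dict[str, List[str]]
-- ) -> Dict[str, List[str]]:
--     """Resolve circular dependencies in import structure.
--
--     Args:
--         module_imports: Dictionary of module imports
--
--     Returns:
--         Cleaned import dictionary
--     """
--     # Build dependency matrix
--     modules = list(module_imports.keys())
--     n = len(modules)
--
--     # Initialize adjacency matrix
--     matrix = [[0 for _ in range(n)] for _ in range(n)]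
--
--     # Fill matrix with direct dependencies
--     module_indices = {name: i for i, name in enumerate(modules)}
--
--     for module, imports in module_imports.items():
--         i = module_indices[module]
--         for imp in imports:
--             if imp in module_indices:
--                 j = module_indices[imp]
--                 matrix[i][j] = 1
--
--     # Find cycles
--     visited = [0] * n
--     recursion_stack = [0] * n
--     cycles = []
--
--     def dfs(node, path):
--         visited[node] = 1
--         recursion_stack[node] = 1
--
--         for neighbor in range(n):
--             if matrix[node][neighbor] == 1:
--                 if recursion_stack[neighbor] == 1:
--                     # Cycle found
--                     cycle = path + [modules[neighbor]]
--                     if cycle not in cycles: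
--                         cycles.append(cycle)
--                 elif visited[neighbor] == 0:
--                     dfs(neighbor, path + [modules[neighbor]])
--
--         recursion_stack[node] = 0
--
--     for i in range(n):
--         if visited[i] == 0:
--             dfs(i, [modules[i]])
--
--     # Break cycles by removing the weakest dependency in each cycle
--     for cycle in cycles:
--         # Find the dependency with the fewest imports
--         min_imports = float('inf')
--         weakest_link = (cycle[0], cycle[1])
--
--         for i in range(len(cycle)):
--             from_module = cycle[i]
--             to_module = cycle[(i+1) % len(cycle)]
--
--             count = len(module_imports.get(from_module, []))
--             if count < min_imports:
--                 min_imports = count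
--                 weakest_link = (from_module, to_module)
--
--         # Remove the weakest dependency
--         if weakest_link[1] in module_imports.get(weakest_link[0], []):
--             module_imports[weakest_link[0]].remove(weakest_link[1])
--
--     return module_imports
-- ===== SOURCE B (Python) =====
-- def _resolve_circular_dependencies(module_imports):
--     """Same result as A, but: deduplicated index-sorted adjacency lists instead
--     of an n*n matrix, an ITERATIVE DFS with an explicit frame stack instead of
--     recursion, and min(key=...) over zip-built cycle edges for the weakest link.
--     NOTE: like A, mutates module_imports in place (removes broken edges)."""
--     modules = list(module_imports)
--     index = {name: i for i, name in enumerate(modules)}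
--     n = len(modules)
--     # deduplicated, index-sorted adjacency lists: only real edges are kept
--     adj = [sorted({index[imp] for imp in imports if imp in index})
--            for imports in module_imports.values()]
--
--     visited = [0] * n
--     on_stack = [0] * n
--     cycles = []
--
--     for start in range(n):
--         if visited[start] != 0:
--             continue
--         visited[start] = 1
--         on_stack[start] = 1
--         # each frame: (node, position of the next neighbour to try, path so far)
--         stack = [(start, 0, [modules[start]])]
--         while stack:
--             node, pos, path = stack.pop()
--             if pos >= len(adj[node]):
--                 on_stack[node] = 0
--                 continue
--             j = adj[node][pos]
--             stack.append((node, pos + 1, path))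
--             if on_stack[j] == 1:
--                 cycle = path + [modules[j]]
--                 if cycle not in cycles:
--                     cycles.append(cycle)
--             elif visited[j] == 0:
--                 visited[j] = 1
--                 on_stack[j] = 1
--                 stack.append((j, 0, path + [modules[j]]))
--
--     for cycle in cycles:
--         edges = list(zip(cycle, cycle[1:] + cycle[:1]))
--         weakest = min(edges, key=lambda e: len(module_imports.get(e[0], [])))
--         if weakest[1] in module_imports.get(weakest[0], []):
--             module_imports[weakest[0]].remove(weakest[1])
--
--     return module_imports
-- ===== Notes on version B (the rewrite author's own statement) =====
-- stated objective: faster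
-- what changed: Replaces the n×n adjacency matrix and O(n) per-node neighbour scans by deduplicated index-sorted adjacency lists (built once from the import dict), replaces the recursive DFS by an iterative DFS driven by an explicit stack of (node, next-neighbour-position, path) frames, and picks each cycle's weakest link with min(key=...) over zip-built edge pairs instead of an indexed scanning loop.
import Mathlib
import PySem

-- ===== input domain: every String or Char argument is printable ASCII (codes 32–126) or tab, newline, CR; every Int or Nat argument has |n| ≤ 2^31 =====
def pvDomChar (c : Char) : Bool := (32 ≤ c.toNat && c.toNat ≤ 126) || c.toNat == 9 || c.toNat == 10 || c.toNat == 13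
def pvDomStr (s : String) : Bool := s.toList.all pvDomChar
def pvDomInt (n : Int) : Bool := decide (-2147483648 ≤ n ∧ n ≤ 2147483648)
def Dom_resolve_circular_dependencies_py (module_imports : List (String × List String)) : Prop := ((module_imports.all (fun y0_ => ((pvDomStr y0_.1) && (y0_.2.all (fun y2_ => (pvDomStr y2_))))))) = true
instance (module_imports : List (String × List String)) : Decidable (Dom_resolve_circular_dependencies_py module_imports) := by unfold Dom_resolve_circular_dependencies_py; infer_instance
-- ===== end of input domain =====

-- B replaces A's n×n adjacency matrix by index-sorted adjacency lists, runs the DFS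
-- iteratively with an explicit stack of (node, next-neighbour-position, path) frames
-- instead of recursion, and picks each cycle's weakest link with min over zip-built
-- edges; like A it mutates the argument dict in place, equivalence here is about the
-- return value.


-- ===== PORT A =====
-- module_indices = {name: i for i, name in enumerate(modules)}
def pvBuildIdxA (modules : List String) : PySem.Dict String Nat :=
  (modules.zipIdx).foldl (fun d p => d.insert p.1 p.2) PySem.Dict.empty

-- matrix = [[0]*n]*n; then matrix[i][j] = 1 for each in-project import (all indices are
-- < n, so Python's in-range list assignment/read is List.set / List.getD)
def pvMatrixA (idx : PySem.Dict String Nat) (n : Nat)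
    (module_imports : List (String × List String)) : List (List Nat) :=
  module_imports.foldl (fun mat p =>
      let i := idx.getD p.1 0
      p.2.foldl (fun mat imp =>
        if idx.contains imp then
          mat.set i ((mat.getD i []).set (idx.getD imp 0) 1)
        else mat) mat)
    (List.replicate n (List.replicate n 0))

-- def dfs(node, path): …  — state (visited, recursion_stack, cycles); fuel = n+1 is a pure
-- totality guard (each call marks a fresh node visited, so the depth never exceeds n).
def pvDfsA (matrix : List (List Nat)) (modules : List String) (n : Nat) :
    Nat → Nat → List String → List Nat × List Nat × List (List String) →
    List Nat × List Nat × List (List String)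
  | 0, _, _, st => st
  | Nat.succ fuel, node, path, st =>
    let v := st.1.set node 1            -- visited[node] = 1
    let r := st.2.1.set node 1          -- recursion_stack[node] = 1
    let st1 := (List.range n).foldl (fun st neighbor =>
      if (matrix.getD node []).getD neighbor 0 == 1 then
        if st.2.1.getD neighbor 0 == 1 then
          let cycle := path ++ [modules.getD neighbor ""]
          if cycle ∈ st.2.2 then st else (st.1, st.2.1, st.2.2 ++ [cycle])
        else if st.1.getD neighbor 0 == 0 then
          pvDfsA matrix modules n fuel neighbor (path ++ [modules.getD neighbor ""]) st
        else st
      else st) (v, r, st.2.2)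
    (st1.1, st1.2.1.set node 0, st1.2.2)

-- for i in range(n): if visited[i] == 0: dfs(i, [modules[i]])
def pvCyclesA (matrix : List (List Nat)) (modules : List String) (n : Nat) :
    List (List String) :=
  ((List.range n).foldl (fun st i =>
      if st.1.getD i 0 == 0 then
        pvDfsA matrix modules n (n + 1) i [modules.getD i ""] st
      else st)
    (List.replicate n 0, List.replicate n 0, ([] : List (List String)))).2.2

-- one pass of the cycle-breaking loop: scan all cycle edges for the weakest link
-- (min_imports = float('inf') is modelled as none) and remove it from the dict
def pvBreakA (d : PySem.Dict String (List String)) (cycle : List String) :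
    PySem.Dict String (List String) :=
  let res := (List.range cycle.length).foldl
    (fun (cur : Option Nat × String × String) i =>
      let fm := cycle.getD i ""
      let tm := cycle.getD ((i + 1) % cycle.length) ""
      let count := (d.getD fm []).length
      let take := match cur.1 with
        | none => true                          -- count < float('inf')
        | some v => decide (count < v)
      if take then (some count, fm, tm) else cur)
    (none, cycle.getD 0 "", cycle.getD 1 "")
  let wl := res.2
  if (d.getD wl.1 []).contains wl.2 then
    match PySem.List.remove? (d.getD wl.1 []) wl.2 with
    | some l => d.insert wl.1 l
    | none => d
  else d

def resolve_circular_dependencies_py (module_imports : List (String × List String)) :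
    List (String × List String) :=
  let modules := module_imports.map Prod.fst
  let n := modules.length
  let idx := pvBuildIdxA modules
  let matrix := pvMatrixA idx n module_imports
  let cycles := pvCyclesA matrix modules n
  (cycles.foldl pvBreakA (PySem.Dict.mk module_imports)).items

-- ===== PORT B =====
-- index = {name: i for i, name in enumerate(modules)}
def pvBuildIdxB (names : List String) : PySem.Dict String Nat :=
  List.foldl (fun acc q => PySem.Dict.insert acc q.1 q.2) PySem.Dict.empty (List.zipIdx names)

-- adj = [sorted({index[imp] for imp in imports if imp in index}) for imports in …values()]
def pvAdjB (tbl : PySem.Dict String Nat) (module_imports : List (String × List String)) :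
    List (List Nat) :=
  List.map (fun row =>
    PySem.List.sorted (PySem.Set.ofList
      (List.filterMap (fun target => PySem.Dict.get? tbl target) row.2))
      (fun x => x) false) module_imports

-- machine state: the three mutable lists (visited, on_stack, cycles), and one
-- stack frame per suspended loop iteration
abbrev PvStB := List Nat × List Nat × List (List String)
abbrev PvFrameB := Nat × Nat × List String

-- while stack: node, pos, path = stack.pop(); …  — the explicit-stack DFS loop, with the
-- three mutable lists visited / on_stack / cycles as named state components.
-- The gas argument and the in-range test 'w < visited.length' are pure totality guards
-- (every iteration strictly decreases a measure bounded by the gas the caller passes;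
-- on reachable states neither guard ever changes the computation).
def pvRunB (g : List (List Nat)) (names : List String) :
    Nat → List PvFrameB → PvStB → PvStB
  | 0, _, s => s
  | _ + 1, [], s => s
  | gas + 1, (u, k, trail) :: frames, (visited, on_stack, cycles) =>
    if List.length (List.getD g u []) ≤ k then
      pvRunB g names gas frames (visited, List.set on_stack u 0, cycles)
    else
      let w := List.getD (List.getD g u []) k 0
      if List.getD on_stack w 0 == 1 then
        let cyc := trail ++ [List.getD names w ""]
        pvRunB g names gas ((u, k + 1, trail) :: frames)
          (visited, on_stack, if cyc ∈ cycles then cycles else cycles ++ [cyc])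
      else if w < List.length visited ∧ List.getD visited w 0 == 0 then
        pvRunB g names gas
          ((w, 0, trail ++ [List.getD names w ""]) :: (u, k + 1, trail) :: frames)
          (List.set visited w 1, List.set on_stack w 1, cycles)
      else
        pvRunB g names gas ((u, k + 1, trail) :: frames) (visited, on_stack, cycles)

-- for start in range(n): if not visited[start]: mark start, run the machine
def pvCyclesB (g : List (List Nat)) (names : List String) (total : Nat) :
    List (List String) :=
  ((List.range total).foldl (fun (visited, on_stack, cycles) start =>
      if List.getD visited start 0 == 0 then
        pvRunB g names ((total + 1) * (List.sum (List.map List.length g) + 3))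
          [(start, 0, [List.getD names start ""])]
          (List.set visited start 1, List.set on_stack start 1, cycles)
      else (visited, on_stack, cycles))
    (List.replicate total 0, List.replicate total 0, ([] : List (List String)))).2.2

-- edges = list(zip(cycle, cycle[1:] + cycle[:1]));
-- weakest = min(edges, key=lambda e: len(module_imports.get(e[0], [])))
def pvBreakB (table : PySem.Dict String (List String)) (cyc : List String) :
    PySem.Dict String (List String) :=
  let edges := List.zip cyc (PySem.List.slice cyc (some 1) none ++
                             PySem.List.slice cyc none (some 1))
  match PySem.List.min? edges (fun e => List.length (PySem.Dict.getD table e.1 [])) with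
  | none => table        -- unreachable: every recorded cycle is nonempty
  | some best =>
    if List.contains (PySem.Dict.getD table best.1 []) best.2 then
      match PySem.List.remove? (PySem.Dict.getD table best.1 []) best.2 with
      | some remaining => PySem.Dict.insert table best.1 remaining
      | none => table
    else table

def resolve_circular_dependencies_py_alt (module_imports : List (String × List String)) :
    List (String × List String) :=
  let names := List.map Prod.fst module_imports
  let total := List.length names
  let tbl := pvBuildIdxB names
  let g := pvAdjB tbl module_imports
  let cycs := pvCyclesB g names total
  (List.foldl pvBreakB (PySem.Dict.mk module_imports) cycs).items

-- ===== PRECONDITION & SPEC =====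
-- Pre_ excludes association lists with duplicate keys: they do not represent any Python
-- dict (A's argument is a dict, whose keys are necessarily distinct).
def Pre_resolve_circular_dependencies_py (module_imports : List (String × List String)) : Prop :=
  (module_imports.map Prod.fst).Nodup
instance (module_imports : List (String × List String)) : Decidable (Pre_resolve_circular_dependencies_py module_imports) := by unfold Pre_resolve_circular_dependencies_py; infer_instance
def pvWitness_resolve_circular_dependencies_py : (List (String × List String)) :=
  [("a", ["b"]), ("b", ["a", "c"])]
def Spec_resolve_circular_dependencies_py (module_imports : List (String × List String)) (out : List (String × List String)) : Prop := out = resolve_circular_dependencies_py_alt module_imports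
instance (module_imports : List (String × List String)) (out : List (String × List String)) : Decidable (Spec_resolve_circular_dependencies_py module_imports out) := by unfold Spec_resolve_circular_dependencies_py; infer_instance

-- ===== CLAIM (what is proved, stated in full; the proofs are below) =====
def Claim_equal_resolve_circular_dependencies_py : Prop := ∀ (module_imports : List (String × List String)), Dom_resolve_circular_dependencies_py module_imports → Pre_resolve_circular_dependencies_py module_imports → Spec_resolve_circular_dependencies_py module_imports (resolve_circular_dependencies_py module_imports)

-- ===== LEMMAS AND PROOFS =====

-- proof-side recursive DFS over the adjacency lists: the bridge between A's
-- matrix recursion and B's stack machine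
def pvDfsR (adj : List (List Nat)) (modules : List String) :
    Nat → Nat → List String → List Nat × List Nat × List (List String) →
    List Nat × List Nat × List (List String)
  | 0, _, _, st => st
  | Nat.succ fuel, node, path, st =>
    let v := st.1.set node 1
    let r := st.2.1.set node 1
    let st1 := (adj.getD node []).foldl (fun st j =>
      if st.2.1.getD j 0 == 1 then
        let cycle := path ++ [modules.getD j ""]
        if cycle ∈ st.2.2 then st else (st.1, st.2.1, st.2.2 ++ [cycle])
      else if st.1.getD j 0 == 0 then
        pvDfsR adj modules fuel j (path ++ [modules.getD j ""]) st
      else st) (v, r, st.2.2)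
    (st1.1, st1.2.1.set node 0, st1.2.2)

def pvCyclesR (adj : List (List Nat)) (modules : List String) (n : Nat) :
    List (List String) :=
  ((List.range n).foldl (fun st i =>
      if st.1.getD i 0 == 0 then
        pvDfsR adj modules (n + 1) i [modules.getD i ""] st
      else st)
    (List.replicate n 0, List.replicate n 0, ([] : List (List String)))).2.2

-- frame continuation: process the remaining neighbours js of node, then unmark node
def pvFinR (adj : List (List Nat)) (modules : List String) (fuel node : Nat) :
    List Nat → List String → List Nat × List Nat × List (List String) →
    List Nat × List Nat × List (List String)
  | [], _, st => (st.1, st.2.1.set node 0, st.2.2)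
  | j :: rest, path, st =>
    if st.2.1.getD j 0 == 1 then
      let cycle := path ++ [modules.getD j ""]
      pvFinR adj modules fuel node rest path
        (if cycle ∈ st.2.2 then st else (st.1, st.2.1, st.2.2 ++ [cycle]))
    else if st.1.getD j 0 == 0 then
      pvFinR adj modules fuel node rest path
        (pvDfsR adj modules fuel j (path ++ [modules.getD j ""]) st)
    else pvFinR adj modules fuel node rest path st

theorem pv_get?_buildIdx (l : List String) (h : l.Nodup) (x : String) :
    (pvBuildIdxA l).get? x = PySem.List.index? l x := by
  induction l using List.reverseRecOn with
  | nil => simp [pvBuildIdxA, PySem.List.index?, PySem.Dict.get?, PySem.Dict.empty]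
  | append_singleton l a ih =>
    have hna : a ∉ l := by
      have := List.nodup_append.mp h; simp at this; tauto
    have hbuild : pvBuildIdxA (l ++ [a]) = (pvBuildIdxA l).insert a l.length := by
      simp [pvBuildIdxA, List.zipIdx_append]
    rw [hbuild, PySem.Dict.get?_insert]
    by_cases hxa : x = a
    · subst hxa
      rw [PySem.List.index?_append_singleton_self l x hna]
      simp
    · simp only [if_neg hxa]
      rw [ih (List.Nodup.of_append_left h)]
      by_cases hxl : x ∈ l
      · rw [PySem.List.index?_append_of_mem _ hxl]
      · rw [(PySem.List.index?_eq_none_iff _ _).mpr hxl,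
          (PySem.List.index?_eq_none_iff _ _).mpr (by simp [hxl, Ne.symm, hxa])]

theorem pv_index?_getElem (l : List String) (h : l.Nodup) (k : Nat) (hk : k < l.length) :
    PySem.List.index? l l[k] = some k := by
  rw [PySem.List.index?_eq_some_iff]
  refine ⟨l.take k, l.drop (k + 1), ?_, by simp [List.length_take]; omega, ?_⟩
  · conv_lhs => rw [← List.take_append_drop k l]
    rw [List.drop_eq_getElem_cons hk]
  · intro hmem
    obtain ⟨j, hj, hje⟩ := List.getElem_of_mem hmem
    rw [List.getElem_take] at hje
    have hjl : j < l.length := by simp at hj; omega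
    have : j = k := (List.Nodup.getElem_inj_iff h).mp hje
    simp at hj; omega

theorem pv_get?_lt (l : List String) (x : String) (j : Nat)
    (h : l.Nodup) (hg : (pvBuildIdxA l).get? x = some j) : j < l.length := by
  rw [pv_get?_buildIdx l h] at hg
  obtain ⟨pre, suf, hpre, hlen, -⟩ := (PySem.List.index?_eq_some_iff _ _ _).mp hg
  subst hpre; simp [← hlen]

-- L4: repeated in-place update of row i = one set of the locally folded row
theorem pv_inner_set (c : String → Bool) (jf : String → Nat) :
    ∀ (imps : List String) (mat : List (List Nat)) (i : Nat), i < mat.length →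
    imps.foldl (fun mat imp => if c imp then mat.set i ((mat.getD i []).set (jf imp) 1) else mat) mat
      = mat.set i (imps.foldl (fun r imp => if c imp then r.set (jf imp) 1 else r) (mat.getD i [])) := by
  intro imps
  induction imps with
  | nil =>
    intro mat i hi
    simp [List.getElem?_eq_getElem hi, List.set_getElem_self]
  | cons imp rest ih =>
    intro mat i hi
    by_cases hc : c imp
    · simp only [List.foldl_cons, if_pos hc]
      rw [ih _ i (by simpa using hi)]
      rw [List.set_set]
      congr 1
      rw [List.getD_eq_getElem _ _ (by simpa using hi),
        List.getElem_set_self (by simpa using hi), List.getD_eq_getElem _ _ hi]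
    · simp only [List.foldl_cons, if_neg hc]
      exact ih _ i hi

-- L5: membership characterisation of the set-to-1 fold
theorem pv_setfold_getD :
    ∀ (js : List Nat) (r : List Nat) (j : Nat),
    (js.foldl (fun r j => r.set j 1) r).getD j 0
      = if j ∈ js ∧ j < r.length then 1 else r.getD j 0 := by
  intro js
  induction js with
  | nil => simp
  | cons j0 js ih =>
    intro r j
    simp only [List.foldl_cons]
    rw [ih]
    simp only [List.length_set, List.mem_cons]
    by_cases hlt : j < r.length
    · by_cases hmem : j ∈ js
      · simp [hmem, hlt]
      · by_cases hjj : j = j0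
        · subst hjj
          rw [if_neg (by tauto), if_pos (by tauto),
            List.getD_eq_getElem _ _ (by simpa using hlt),
            List.getElem_set_self (by simpa using hlt)]
        · rw [if_neg (by tauto), if_neg (by tauto),
            List.getD_eq_getElem _ _ (by simpa using hlt),
            List.getD_eq_getElem _ _ hlt, List.getElem_set_ne (fun h => hjj h.symm)]
    · rw [if_neg (by tauto), if_neg (by tauto),
        List.getD_eq_default _ _ (by simpa using Nat.le_of_not_lt hlt),
        List.getD_eq_default _ _ (Nat.le_of_not_lt hlt)]

def pvFillRow (idx : PySem.Dict String Nat) (r : List Nat) (imps : List String) : List Nat :=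
  imps.foldl (fun r imp => if idx.contains imp then r.set (idx.getD imp 0) 1 else r) r

def pvJs (idx : PySem.Dict String Nat) (imps : List String) : List Nat :=
  imps.filterMap (fun imp => idx.get? imp)

theorem pv_fillRow_eq_setfold (idx : PySem.Dict String Nat) (imps : List String) (r : List Nat) :
    pvFillRow idx r imps = (pvJs idx imps).foldl (fun r j => r.set j 1) r := by
  unfold pvFillRow pvJs
  rw [List.foldl_filterMap]
  apply PySem.List.foldl_congr_mem
  intro acc imp _
  rw [PySem.Dict.contains_eq_isSome_get?, PySem.Dict.getD_eq_get?_getD]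
  cases h : idx.get? imp <;> simp

theorem pv_fillRow_getD (idx : PySem.Dict String Nat) (imps : List String) (n j : Nat) :
    (pvFillRow idx (List.replicate n 0) imps).getD j 0
      = if j ∈ pvJs idx imps ∧ j < n then 1 else 0 := by
  rw [pv_fillRow_eq_setfold, pv_setfold_getD]
  by_cases h : j ∈ pvJs idx imps ∧ j < n
  · simp [h]
  · simp only [List.length_replicate, if_neg h]
    by_cases hj : j < n
    · rw [List.getD_eq_getElem _ _ (by simpa using hj)]; simp
    · rw [List.getD_eq_default _ _ (by simpa using Nat.le_of_not_lt hj)]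

theorem pv_len_inner (idx : PySem.Dict String Nat) (i : Nat) :
    ∀ (imps : List String) (mat : List (List Nat)),
    (imps.foldl (fun mat imp => if idx.contains imp then
        mat.set i ((mat.getD i []).set (idx.getD imp 0) 1) else mat) mat).length
      = mat.length := by
  intro imps
  induction imps with
  | nil => simp
  | cons imp rest ih =>
    intro mat
    simp only [List.foldl_cons]
    split
    · rw [ih]; simp
    · exact ih mat

def pvStepMat (idx : PySem.Dict String Nat) (mat : List (List Nat))
    (p : String × List String) : List (List Nat) :=
  p.2.foldl (fun mat imp => if idx.contains imp then
      mat.set (idx.getD p.1 0) ((mat.getD (idx.getD p.1 0) []).set (idx.getD imp 0) 1)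
      else mat) mat

theorem pv_len_stepfold (idx : PySem.Dict String Nat) :
    ∀ (l : List (String × List String)) (M : List (List Nat)),
    (l.foldl (pvStepMat idx) M).length = M.length := by
  intro l
  induction l with
  | nil => simp
  | cons p l ih =>
    intro M
    simp only [List.foldl_cons]
    rw [ih, pvStepMat, pv_len_inner]

theorem pv_fold_rows (idx : PySem.Dict String Nat) :
    ∀ (l : List (String × List String)) (M : List (List Nat)),
    (∀ k (hk : k < l.length), idx.getD (l[k].1) 0 = k) → l.length ≤ M.length →
    ∀ t, ((l.foldl (pvStepMat idx) M).getD t [])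
      = if t < l.length then pvFillRow idx (M.getD t []) ((l.getD t ("", [])).2)
        else M.getD t [] := by
  intro l
  induction l using List.reverseRecOn with
  | nil => simp
  | append_singleton l p ih =>
    intro M hpos hlen t
    rw [List.foldl_append, List.foldl_cons, List.foldl_nil]
    have hplen : l.length < M.length := by simpa using hlen
    have hlenM : (l.foldl (pvStepMat idx) M).length = M.length := pv_len_stepfold idx l M
    have hi : idx.getD p.1 0 = l.length := by
      have := hpos l.length (by simp)
      simpa [List.getElem_concat_length] using this
    have hih := ih M (fun k hk => by
        have := hpos k (by simp; omega)
        rwa [List.getElem_append_left hk] at this) (by omega)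
    rw [pvStepMat, pv_inner_set _ _ _ _ _ (by rw [hlenM, hi]; omega)]
    have hrow : ∀ (r : List Nat),
        (p.2.foldl (fun r imp => if idx.contains imp then r.set (idx.getD imp 0) 1 else r) r)
          = pvFillRow idx r p.2 := fun r => rfl
    simp only [List.getD_eq_getElem?_getD, List.getElem?_set, hrow, hi]
    rcases Nat.lt_trichotomy t l.length with ht | ht | ht
    · rw [if_neg (by omega)]
      have := hih t
      simp only [List.getD_eq_getElem?_getD] at this
      rw [this, if_pos ht, if_pos (by simp; omega),
        List.getElem?_append_left (by simpa using ht)]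
    · subst ht
      rw [if_pos rfl, if_pos (by omega), if_pos (by simp)]
      have := hih l.length
      simp only [List.getD_eq_getElem?_getD] at this
      rw [this] at *
      rw [if_neg (by omega)]
      simp
    · rw [if_neg (by omega), if_neg (by simp; omega)]
      have := hih t
      simp only [List.getD_eq_getElem?_getD] at this
      rw [this, if_neg (by omega)]

-- B's index dict is built by the same comprehension as A's
theorem pv_idx_BA : pvBuildIdxB = pvBuildIdxA := rfl

theorem pv_js_lt (mi : List (String × List String)) (h : (mi.map Prod.fst).Nodup)
    (imps : List String) (j : Nat)
    (hj : j ∈ pvJs (pvBuildIdxA (mi.map Prod.fst)) imps) : j < mi.length := by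
  obtain ⟨imp, -, hg⟩ := List.mem_filterMap.mp hj
  simpa using pv_get?_lt (mi.map Prod.fst) imp j h hg

theorem pv_hpos (mi : List (String × List String)) (h : (mi.map Prod.fst).Nodup)
    (k : Nat) (hk : k < mi.length) :
    (pvBuildIdxA (mi.map Prod.fst)).getD (mi[k].1) 0 = k := by
  rw [PySem.Dict.getD_eq_get?_getD]
  have hk' : k < (mi.map Prod.fst).length := by simpa using hk
  have : mi[k].1 = (mi.map Prod.fst)[k]'hk' := by simp
  rw [this, pv_get?_buildIdx _ h, pv_index?_getElem _ h k hk']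
  rfl

theorem pv_matrix_rows (mi : List (String × List String)) (h : (mi.map Prod.fst).Nodup)
    (k : Nat) (hk : k < mi.length) :
    (pvMatrixA (pvBuildIdxA (mi.map Prod.fst)) mi.length mi).getD k []
      = pvFillRow (pvBuildIdxA (mi.map Prod.fst)) (List.replicate mi.length 0) (mi[k].2) := by
  have hstep : pvMatrixA (pvBuildIdxA (mi.map Prod.fst)) mi.length mi
      = mi.foldl (pvStepMat (pvBuildIdxA (mi.map Prod.fst)))
          (List.replicate mi.length (List.replicate mi.length 0)) := rfl
  rw [hstep, pv_fold_rows _ mi _ (fun k hk => pv_hpos mi h k hk) (by simp), if_pos hk]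
  congr 1
  · rw [List.getD_eq_getElem _ _ (by simpa using hk)]
    simp
  · rw [List.getD_eq_getElem _ _ hk]

theorem pv_adj_eq (mi : List (String × List String)) (h : (mi.map Prod.fst).Nodup)
    (k : Nat) (hk : k < mi.length) :
    (pvAdjB (pvBuildIdxA (mi.map Prod.fst)) mi).getD k []
      = (List.range mi.length).filter (fun j =>
          ((pvMatrixA (pvBuildIdxA (mi.map Prod.fst)) mi.length mi).getD k
            []).getD j 0 == 1) := by
  have hfil : (List.range mi.length).filter (fun j =>
        ((pvMatrixA (pvBuildIdxA (mi.map Prod.fst)) mi.length mi).getD k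
          []).getD j 0 == 1)
      = (List.range mi.length).filter
          (fun j => decide (j ∈ pvJs (pvBuildIdxA (mi.map Prod.fst)) (mi[k].2))) := by
    apply List.filter_congr
    intro j hj
    have hjn : j < mi.length := List.mem_range.mp hj
    rw [pv_matrix_rows mi h k hk, pv_fillRow_getD]
    by_cases hmem : j ∈ pvJs (pvBuildIdxA (mi.map Prod.fst)) (mi[k].2)
    · simp [hmem, hjn]
    · simp [hmem, hjn]
  rw [hfil]
  have hadj : (pvAdjB (pvBuildIdxA (mi.map Prod.fst)) mi).getD k []
      = PySem.List.sorted (PySem.Set.ofList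
          (pvJs (pvBuildIdxA (mi.map Prod.fst)) (mi[k].2))) (fun x => x) false := by
    unfold pvAdjB
    rw [List.getD_eq_getElem _ _ (by simpa using hk), List.getElem_map]
    rfl
  rw [hadj]
  apply PySem.List.sorted_eq_of_perm_of_pairwise_lt
  · rw [List.perm_ext_iff_of_nodup ((List.nodup_range).filter _) (PySem.Set.nodup_ofList _)]
    intro a
    simp only [List.mem_filter, List.mem_range, PySem.Set.mem_ofList, decide_eq_true_eq]
    exact ⟨fun x => x.2, fun hx => ⟨pv_js_lt mi h _ a hx, hx⟩⟩
  · exact (List.pairwise_lt_range).filter _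

theorem pv_dfs_eq (matrix : List (List Nat)) (adj : List (List Nat))
    (modules : List String) (n : Nat)
    (hadj : ∀ node, node < n → adj.getD node []
        = (List.range n).filter (fun j => (matrix.getD node []).getD j 0 == 1)) :
    ∀ (fuel node : Nat) (path : List String)
      (st : List Nat × List Nat × List (List String)), node < n →
      pvDfsA matrix modules n fuel node path st = pvDfsR adj modules fuel node path st := by
  intro fuel
  induction fuel with
  | zero => intro node path st hn; rfl
  | succ fuel ih =>
    intro node path st hn
    simp only [pvDfsA, pvDfsR]
    rw [PySem.List.foldl_if_eq_foldl_filter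
      (fun neighbor => (matrix.getD node []).getD neighbor 0 == 1), ← hadj node hn]
    rw [PySem.List.foldl_congr_mem _ _ _ _ ?_]
    intro acc j hj
    have hjn : j < n := by
      rw [hadj node hn] at hj
      exact List.mem_range.mp (List.mem_of_mem_filter hj)
    simp only [ih j _ acc hjn]

theorem pv_cycles_eq (matrix : List (List Nat)) (adj : List (List Nat))
    (modules : List String) (n : Nat)
    (hadj : ∀ node, node < n → adj.getD node []
        = (List.range n).filter (fun j => (matrix.getD node []).getD j 0 == 1)) :
    pvCyclesA matrix modules n = pvCyclesR adj modules n := by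
  unfold pvCyclesA pvCyclesR
  rw [PySem.List.foldl_congr_mem _ _ _ _ ?_]
  intro acc i hi
  rw [pv_dfs_eq matrix adj modules n hadj _ _ _ _ (List.mem_range.mp hi)]

-- every recorded cycle is path ++ [m], hence nonempty
theorem pv_dfs_ne (adj : List (List Nat)) (modules : List String) :
    ∀ (fuel node : Nat) (path : List String)
      (st : List Nat × List Nat × List (List String)),
      (∀ c ∈ st.2.2, c ≠ []) →
      ∀ c ∈ (pvDfsR adj modules fuel node path st).2.2, c ≠ [] := by
  intro fuel
  induction fuel with
  | zero => intro node path st h; exact h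
  | succ fuel ih =>
    intro node path st h
    simp only [pvDfsR]
    have haux : ∀ (l : List Nat) (st' : List Nat × List Nat × List (List String)),
        (∀ c ∈ st'.2.2, c ≠ []) →
        ∀ c ∈ (l.foldl (fun st j =>
          if st.2.1.getD j 0 == 1 then
            let cycle := path ++ [modules.getD j ""]
            if cycle ∈ st.2.2 then st else (st.1, st.2.1, st.2.2 ++ [cycle])
          else if st.1.getD j 0 == 0 then
            pvDfsR adj modules fuel j (path ++ [modules.getD j ""]) st
          else st) st').2.2, c ≠ [] := by
      intro l
      induction l with
      | nil => intro st' h'; exact h'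
      | cons j l ihl =>
        intro st' h'
        simp only [List.foldl_cons]
        apply ihl
        split
        · split
          · exact h'
          · intro c hc
            rcases List.mem_append.mp hc with hc | hc
            · exact h' c hc
            · simp at hc; subst hc; simp
        · split
          · exact ih j _ st' h'
          · exact h'
    intro c hc
    exact haux _ _ (by exact h) c hc

theorem pv_cycles_ne (adj : List (List Nat)) (modules : List String) (n : Nat) :
    ∀ c ∈ pvCyclesR adj modules n, c ≠ [] := by
  unfold pvCyclesR
  have haux : ∀ (l : List Nat) (st : List Nat × List Nat × List (List String)),
      (∀ c ∈ st.2.2, c ≠ []) →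
      ∀ c ∈ (l.foldl (fun st i =>
          if st.1.getD i 0 == 0 then
            pvDfsR adj modules (n + 1) i [modules.getD i ""] st
          else st) st).2.2, c ≠ [] := by
    intro l
    induction l with
    | nil => intro st h; exact h
    | cons i l ihl =>
      intro st h
      simp only [List.foldl_cons]
      apply ihl
      split
      · exact pv_dfs_ne adj modules (n + 1) i _ st h
      · exact h
  exact haux _ _ (by simp)

-- ----- stack machine = recursion -----

theorem pv_count_set_le (l : List Nat) : ∀ (j : Nat),
    (l.set j 1).count 0 ≤ l.count 0 := by
  induction l with
  | nil => intro j; simp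
  | cons a t ih =>
    intro j
    cases j with
    | zero => simp [List.count_cons]
    | succ j =>
      simp only [List.set_cons_succ, List.count_cons]
      have := ih j
      omega

theorem pv_foldR_inv (adj : List (List Nat)) (modules : List String) (fuel : Nat)
    (Hd : ∀ (node : Nat) (path : List String) (st : List Nat × List Nat × List (List String)),
      (pvDfsR adj modules fuel node path st).1.length = st.1.length ∧
      (pvDfsR adj modules fuel node path st).1.count 0 ≤ st.1.count 0) :
    ∀ (js : List Nat) (path : List String)
      (st : List Nat × List Nat × List (List String)),
    ((js.foldl (fun st j =>
      if st.2.1.getD j 0 == 1 then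
        let cycle := path ++ [modules.getD j ""]
        if cycle ∈ st.2.2 then st else (st.1, st.2.1, st.2.2 ++ [cycle])
      else if st.1.getD j 0 == 0 then
        pvDfsR adj modules fuel j (path ++ [modules.getD j ""]) st
      else st) st).1.length = st.1.length ∧
     (js.foldl (fun st j =>
      if st.2.1.getD j 0 == 1 then
        let cycle := path ++ [modules.getD j ""]
        if cycle ∈ st.2.2 then st else (st.1, st.2.1, st.2.2 ++ [cycle])
      else if st.1.getD j 0 == 0 then
        pvDfsR adj modules fuel j (path ++ [modules.getD j ""]) st
      else st) st).1.count 0 ≤ st.1.count 0) := by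
  intro js
  induction js with
  | nil => intro path st; exact ⟨rfl, le_refl _⟩
  | cons j rest ih =>
    intro path st
    simp only [List.foldl_cons]
    split
    · split
      · exact ih path st
      · obtain ⟨h1, h2⟩ := ih path (st.1, st.2.1, st.2.2 ++ [path ++ [modules.getD j ""]])
        exact ⟨h1, h2⟩
    · split
      · obtain ⟨h1, h2⟩ := ih path (pvDfsR adj modules fuel j (path ++ [modules.getD j ""]) st)
        obtain ⟨hd1, hd2⟩ := Hd j (path ++ [modules.getD j ""]) st
        exact ⟨h1.trans hd1, h2.trans hd2⟩
      · exact ih path st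

theorem pv_dfsR_inv (adj : List (List Nat)) (modules : List String) :
    ∀ (fuel node : Nat) (path : List String)
      (st : List Nat × List Nat × List (List String)),
    (pvDfsR adj modules fuel node path st).1.length = st.1.length ∧
    (pvDfsR adj modules fuel node path st).1.count 0 ≤ st.1.count 0 := by
  intro fuel
  induction fuel with
  | zero => intro node path st; exact ⟨rfl, le_refl _⟩
  | succ fuel ih =>
    intro node path st
    simp only [pvDfsR]
    obtain ⟨h1, h2⟩ := pv_foldR_inv adj modules fuel (fun n p s => ih n p s)
      (adj.getD node []) path (st.1.set node 1, st.2.1.set node 1, st.2.2)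
    constructor
    · simpa using h1
    · exact h2.trans (by simpa using pv_count_set_le st.1 node)

-- one unfolding of pvDfsR as pvFinR over the whole neighbour list
theorem pv_finR_of_foldl (adj : List (List Nat)) (modules : List String) (fuel node : Nat) :
    ∀ (js : List Nat) (path : List String)
      (st : List Nat × List Nat × List (List String)),
    (let st1 := js.foldl (fun st j =>
        if st.2.1.getD j 0 == 1 then
          let cycle := path ++ [modules.getD j ""]
          if cycle ∈ st.2.2 then st else (st.1, st.2.1, st.2.2 ++ [cycle])
        else if st.1.getD j 0 == 0 then
          pvDfsR adj modules fuel j (path ++ [modules.getD j ""]) st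
        else st) st
     (st1.1, st1.2.1.set node 0, st1.2.2))
      = pvFinR adj modules fuel node js path st := by
  intro js
  induction js with
  | nil => intro path st; rfl
  | cons j rest ih =>
    intro path st
    simp only [List.foldl_cons, pvFinR]
    split
    · split <;> exact ih path _
    · split <;> exact ih path _

theorem pv_dfsR_eq_finR (adj : List (List Nat)) (modules : List String)
    (fuel node : Nat) (path : List String)
    (st : List Nat × List Nat × List (List String)) :
    pvDfsR adj modules (fuel + 1) node path st
      = pvFinR adj modules fuel node (adj.getD node []) path
          (st.1.set node 1, st.2.1.set node 1, st.2.2) := by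
  simp only [pvDfsR]
  exact pv_finR_of_foldl adj modules fuel node (adj.getD node []) path
    (st.1.set node 1, st.2.1.set node 1, st.2.2)

-- arithmetic facts for the loop measure
theorem pv_count_set (l : List Nat) : ∀ (j : Nat), j < l.length → l.getD j 0 = 0 →
    (l.set j 1).count 0 + 1 = l.count 0 := by
  induction l with
  | nil => intro j h; simp at h
  | cons a t ih =>
    intro j hj h0
    cases j with
    | zero => simp at h0; simp [h0]
    | succ j =>
      simp only [List.getD_cons_succ] at h0
      simp only [List.set_cons_succ, List.count_cons]
      rw [← ih j (by simpa using hj) h0]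
      omega

theorem pv_getD_len_le (adj : List (List Nat)) : ∀ (j : Nat),
    (adj.getD j []).length ≤ (adj.map List.length).sum := by
  induction adj with
  | nil => intro j; simp
  | cons r t ih =>
    intro j
    cases j with
    | zero => simp
    | succ j =>
      simp only [List.getD_cons_succ, List.map_cons, List.sum_cons]
      exact le_trans (ih j) (Nat.le_add_left _ _)

-- proof-side copy of the machine without fuel (well-founded on the loop measure);
-- the fueled port equals it whenever the fuel exceeds the measure (pv_fuel below)
def pvRunW (adj : List (List Nat)) (modules : List String) :
    List (Nat × Nat × List String) → List Nat × List Nat × List (List String) →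
    List Nat × List Nat × List (List String)
  | [], st => st
  | (node, pos, path) :: stack, st =>
    if h1 : (adj.getD node []).length ≤ pos then
      pvRunW adj modules stack (st.1, st.2.1.set node 0, st.2.2)
    else
      let j := (adj.getD node []).getD pos 0
      if st.2.1.getD j 0 == 1 then
        let cycle := path ++ [modules.getD j ""]
        pvRunW adj modules ((node, pos + 1, path) :: stack)
          (st.1, st.2.1, if cycle ∈ st.2.2 then st.2.2 else st.2.2 ++ [cycle])
      else if h2 : j < st.1.length ∧ st.1.getD j 0 == 0 then
        pvRunW adj modules
          ((j, 0, path ++ [modules.getD j ""]) :: (node, pos + 1, path) :: stack)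
          (st.1.set j 1, st.2.1.set j 1, st.2.2)
      else
        pvRunW adj modules ((node, pos + 1, path) :: stack) st
  termination_by stack st =>
    st.1.count 0 * ((adj.map List.length).sum + 3) +
      (stack.map (fun f => (adj.getD f.1 []).length + 1 - f.2.1)).sum + stack.length
  decreasing_by
  · simp only [List.map_cons, List.sum_cons, List.length_cons]
    omega
  · simp only [List.map_cons, List.sum_cons, List.length_cons]
    omega
  · have hc := pv_count_set st.1 ((adj.getD node []).getD pos 0) h2.1 (by
      have := h2.2; simpa using this)
    have hb := pv_getD_len_le adj ((adj.getD node []).getD pos 0)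
    have hk : List.count 0 st.1 * ((List.map List.length adj).sum + 3)
        = List.count 0 (st.1.set ((adj.getD node []).getD pos 0) 1)
            * ((List.map List.length adj).sum + 3)
          + ((List.map List.length adj).sum + 3) := by
      rw [← hc]; ring
    simp only [List.map_cons, List.sum_cons, List.length_cons]
    omega
  · simp only [List.map_cons, List.sum_cons, List.length_cons]
    omega

-- one-step unfolding of the fueled port machine with plain ifs
theorem pvRunB_step (adj : List (List Nat)) (modules : List String) (fuel : Nat)
    (node pos : Nat) (path : List String) (stack : List (Nat × Nat × List String))
    (st : List Nat × List Nat × List (List String)) :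
    pvRunB adj modules (fuel + 1) ((node, pos, path) :: stack) st
      = if (adj.getD node []).length ≤ pos then
          pvRunB adj modules fuel stack (st.1, st.2.1.set node 0, st.2.2)
        else if st.2.1.getD ((adj.getD node []).getD pos 0) 0 == 1 then
          pvRunB adj modules fuel ((node, pos + 1, path) :: stack)
            (st.1, st.2.1,
             if path ++ [modules.getD ((adj.getD node []).getD pos 0) ""] ∈ st.2.2 then st.2.2
             else st.2.2 ++ [path ++ [modules.getD ((adj.getD node []).getD pos 0) ""]])
        else if (adj.getD node []).getD pos 0 < st.1.length ∧
            st.1.getD ((adj.getD node []).getD pos 0) 0 == 0 then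
          pvRunB adj modules fuel
            (((adj.getD node []).getD pos 0, 0,
              path ++ [modules.getD ((adj.getD node []).getD pos 0) ""]) ::
              (node, pos + 1, path) :: stack)
            (st.1.set ((adj.getD node []).getD pos 0) 1,
             st.2.1.set ((adj.getD node []).getD pos 0) 1, st.2.2)
        else pvRunB adj modules fuel ((node, pos + 1, path) :: stack) st := by
  obtain ⟨visited, on_stack, cycles⟩ := st
  conv_lhs => rw [pvRunB]

-- one-step unfolding of the measure-recursive machine with plain ifs
theorem pvRunW_step (adj : List (List Nat)) (modules : List String)
    (node pos : Nat) (path : List String) (stack : List (Nat × Nat × List String))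
    (st : List Nat × List Nat × List (List String)) :
    pvRunW adj modules ((node, pos, path) :: stack) st
      = if (adj.getD node []).length ≤ pos then
          pvRunW adj modules stack (st.1, st.2.1.set node 0, st.2.2)
        else if st.2.1.getD ((adj.getD node []).getD pos 0) 0 == 1 then
          pvRunW adj modules ((node, pos + 1, path) :: stack)
            (st.1, st.2.1,
             if path ++ [modules.getD ((adj.getD node []).getD pos 0) ""] ∈ st.2.2 then st.2.2
             else st.2.2 ++ [path ++ [modules.getD ((adj.getD node []).getD pos 0) ""]])
        else if (adj.getD node []).getD pos 0 < st.1.length ∧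
            st.1.getD ((adj.getD node []).getD pos 0) 0 == 0 then
          pvRunW adj modules
            (((adj.getD node []).getD pos 0, 0,
              path ++ [modules.getD ((adj.getD node []).getD pos 0) ""]) ::
              (node, pos + 1, path) :: stack)
            (st.1.set ((adj.getD node []).getD pos 0) 1,
             st.2.1.set ((adj.getD node []).getD pos 0) 1, st.2.2)
        else pvRunW adj modules ((node, pos + 1, path) :: stack) st := by
  conv_lhs => rw [pvRunW.eq_2]
  dsimp only
  split_ifs <;> rfl

-- enough fuel: the fueled port machine equals the measure-recursive one
theorem pv_fuel (adj : List (List Nat)) (modules : List String) :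
    ∀ (fuel : Nat) (stack : List (Nat × Nat × List String))
      (st : List Nat × List Nat × List (List String)),
      st.1.count 0 * ((adj.map List.length).sum + 3) +
          (stack.map (fun f => (adj.getD f.1 []).length + 1 - f.2.1)).sum + stack.length
        < fuel →
      pvRunB adj modules fuel stack st = pvRunW adj modules stack st := by
  intro fuel
  induction fuel with
  | zero => intro stack st h; omega
  | succ fuel ih =>
    intro stack st h
    match stack with
    | [] => rw [pvRunW.eq_1]; rfl
    | (node, pos, path) :: stack =>
      simp only [List.map_cons, List.sum_cons, List.length_cons] at h
      rw [pvRunB_step, pvRunW_step]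
      by_cases h1 : (adj.getD node []).length ≤ pos
      · rw [if_pos h1, if_pos h1]
        exact ih _ _ (by simp only []; omega)
      · rw [if_neg h1, if_neg h1]
        by_cases hos : st.2.1.getD ((adj.getD node []).getD pos 0) 0 == 1
        · rw [if_pos hos, if_pos hos]
          exact ih _ _ (by simp only [List.map_cons, List.sum_cons, List.length_cons]; omega)
        · rw [if_neg hos, if_neg hos]
          by_cases h2 : (adj.getD node []).getD pos 0 < st.1.length ∧
              st.1.getD ((adj.getD node []).getD pos 0) 0 == 0
          · rw [if_pos h2, if_pos h2]
            refine ih _ _ ?_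
            have hc := pv_count_set st.1 ((adj.getD node []).getD pos 0) h2.1 (by
              have := h2.2; simpa using this)
            have hb := pv_getD_len_le adj ((adj.getD node []).getD pos 0)
            have hk : List.count 0 st.1 * ((List.map List.length adj).sum + 3)
                = List.count 0 (st.1.set ((adj.getD node []).getD pos 0) 1)
                    * ((List.map List.length adj).sum + 3)
                  + ((List.map List.length adj).sum + 3) := by
              rw [← hc]; ring
            simp only [List.map_cons, List.sum_cons, List.length_cons]
            omega
          · rw [if_neg h2, if_neg h2]
            exact ih _ _ (by simp only [List.map_cons, List.sum_cons, List.length_cons]; omega)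

theorem pv_finR_inv (adj : List (List Nat)) (modules : List String) (fuel node : Nat) :
    ∀ (js : List Nat) (path : List String)
      (st : List Nat × List Nat × List (List String)),
    (pvFinR adj modules fuel node js path st).1.length = st.1.length ∧
    (pvFinR adj modules fuel node js path st).1.count 0 ≤ st.1.count 0 := by
  intro js
  induction js with
  | nil => intro path st; exact ⟨rfl, le_refl _⟩
  | cons j rest ih =>
    intro path st
    simp only [pvFinR]
    split
    · split
      · exact ih path st
      · exact ih path _
    · split
      · obtain ⟨h1, h2⟩ := ih path (pvDfsR adj modules fuel j (path ++ [modules.getD j ""]) st)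
        obtain ⟨hd1, hd2⟩ := pv_dfsR_inv adj modules fuel j (path ++ [modules.getD j ""]) st
        exact ⟨h1.trans hd1, h2.trans hd2⟩
      · exact ih path st

-- the simulation: one machine frame = one pvFinR continuation
theorem pv_sim (adj : List (List Nat)) (modules : List String) (n : Nat)
    (Hadj : ∀ (node j : Nat), j ∈ adj.getD node [] → j < n) :
    ∀ (Z : Nat), ∀ (k : Nat),
    ∀ (st : List Nat × List Nat × List (List String)) (node pos : Nat)
      (path : List String) (stack : List (Nat × Nat × List String)) (f : Nat),
      st.1.length = n →
      pos + k = (adj.getD node []).length →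
      st.1.count 0 ≤ Z → st.1.count 0 ≤ f →
      pvRunW adj modules ((node, pos, path) :: stack) st
        = pvRunW adj modules stack
            (pvFinR adj modules f node ((adj.getD node []).drop pos) path st) := by
  intro Z
  induction Z using Nat.strong_induction_on with
  | _ Z ihZ =>
  intro k
  induction k with
  | zero =>
    intro st node pos path stack f hlen hpos hZ hf
    have hge : (adj.getD node []).length ≤ pos := by omega
    rw [List.drop_eq_nil_of_le hge, pvRunW_step, if_pos hge]
    rfl
  | succ k ihk =>
    intro st node pos path stack f hlen hpos hZ hf
    have hlt : pos < (adj.getD node []).length := by omega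
    have hdrop : (adj.getD node []).drop pos
        = (adj.getD node [])[pos] :: (adj.getD node []).drop (pos + 1) :=
      List.drop_eq_getElem_cons hlt
    have hgetD : (adj.getD node []).getD pos 0 = (adj.getD node [])[pos] :=
      List.getD_eq_getElem _ _ hlt
    have hjn : (adj.getD node [])[pos] < n :=
      Hadj node _ (List.getElem_mem hlt)
    rw [hdrop, pvRunW_step, if_neg (by omega)]
    simp only [hgetD, pvFinR]
    by_cases hos : st.2.1.getD (adj.getD node [])[pos] 0 = 1
    · -- cycle branch
      have hosb : (st.2.1.getD (adj.getD node [])[pos] 0 == 1) = true := beq_iff_eq.mpr hos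
      rw [if_pos hosb, if_pos hosb]
      have harg :
          (if path ++ [modules.getD (adj.getD node [])[pos] ""] ∈ st.2.2 then st
            else (st.1, st.2.1, st.2.2 ++ [path ++ [modules.getD (adj.getD node [])[pos] ""]]))
          = ((st.1, st.2.1,
              if path ++ [modules.getD (adj.getD node [])[pos] ""] ∈ st.2.2 then st.2.2
              else st.2.2 ++ [path ++ [modules.getD (adj.getD node [])[pos] ""]]) :
              List Nat × List Nat × List (List String)) := by
        split <;> rfl
      rw [harg]
      exact ihk _ node (pos + 1) path stack f hlen (by omega) hZ hf
    · have hosb : ¬ ((st.2.1.getD (adj.getD node [])[pos] 0 == 1) = true) := by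
        simpa using hos
      rw [if_neg hosb, if_neg hosb]
      by_cases hv : st.1.getD (adj.getD node [])[pos] 0 = 0
      · -- visit branch
        have hvt : (st.1.getD (adj.getD node [])[pos] 0 == 0) = true := beq_iff_eq.mpr hv
        have hjlen : (adj.getD node [])[pos] < st.1.length := by omega
        have hc := pv_count_set st.1 (adj.getD node [])[pos] hjlen hv
        have hmem : (0 : Nat) ∈ st.1 := by
          rw [List.getD_eq_getElem _ _ hjlen] at hv
          exact hv ▸ List.getElem_mem hjlen
        have hcpos : 1 ≤ st.1.count 0 := List.count_pos_iff.mpr hmem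
        rw [if_pos ⟨hjlen, hvt⟩, if_pos hvt]
        have hstep := ihZ (Z - 1) (by omega) ((adj.getD (adj.getD node [])[pos] []).length)
          (st.1.set (adj.getD node [])[pos] 1, st.2.1.set (adj.getD node [])[pos] 1, st.2.2)
          (adj.getD node [])[pos] 0
          (path ++ [modules.getD (adj.getD node [])[pos] ""])
          ((node, pos + 1, path) :: stack) (f - 1)
          (by simpa using hlen) (by simp)
          (by show (st.1.set (adj.getD node [])[pos] 1).count 0 ≤ Z - 1; omega)
          (by show (st.1.set (adj.getD node [])[pos] 1).count 0 ≤ f - 1; omega)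
        rw [List.drop_zero] at hstep
        rw [hstep]
        have hfin : pvFinR adj modules (f - 1) (adj.getD node [])[pos]
              (adj.getD (adj.getD node [])[pos] [])
              (path ++ [modules.getD (adj.getD node [])[pos] ""])
              (st.1.set (adj.getD node [])[pos] 1, st.2.1.set (adj.getD node [])[pos] 1, st.2.2)
            = pvDfsR adj modules f (adj.getD node [])[pos]
              (path ++ [modules.getD (adj.getD node [])[pos] ""]) st := by
          have hf1 : f = (f - 1) + 1 := by omega
          conv_rhs => rw [hf1]
          rw [pv_dfsR_eq_finR]
        rw [hfin]
        obtain ⟨hl2, hc2⟩ := pv_dfsR_inv adj modules f (adj.getD node [])[pos]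
          (path ++ [modules.getD (adj.getD node [])[pos] ""]) st
        have hc2' : (pvDfsR adj modules f (adj.getD node [])[pos]
            (path ++ [modules.getD (adj.getD node [])[pos] ""]) st).1.count 0
            ≤ st.1.count 0 - 1 := by
          rw [← hfin]
          obtain ⟨-, hfc⟩ := pv_finR_inv adj modules (f - 1) (adj.getD node [])[pos]
            (adj.getD (adj.getD node [])[pos] [])
            (path ++ [modules.getD (adj.getD node [])[pos] ""])
            (st.1.set (adj.getD node [])[pos] 1, st.2.1.set (adj.getD node [])[pos] 1, st.2.2)
          simp only at hfc
          omega
        exact ihZ (Z - 1) (by omega) k _ node (pos + 1) path stack f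
          (by rw [hl2, hlen]) (by omega) (by omega) (by omega)
      · -- skip branch
        have hvb : ¬ ((st.1.getD (adj.getD node [])[pos] 0 == 0) = true) := by simpa using hv
        rw [if_neg (fun h => hvb h.2), if_neg hvb]
        exact ihk st node (pos + 1) path stack f hlen (by omega) hZ hf

theorem pv_driver_eq (adj : List (List Nat)) (modules : List String) (n : Nat)
    (Hadj : ∀ (node j : Nat), j ∈ adj.getD node [] → j < n) :
    ∀ (l : List Nat) (st : List Nat × List Nat × List (List String)),
      st.1.length = n →
      l.foldl (fun st i =>
          if st.1.getD i 0 == 0 then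
            pvDfsR adj modules (n + 1) i [modules.getD i ""] st
          else st) st
        = l.foldl (fun st i =>
            if st.1.getD i 0 == 0 then
              pvRunB adj modules ((n + 1) * ((adj.map List.length).sum + 3))
                [(i, 0, [modules.getD i ""])]
                (st.1.set i 1, st.2.1.set i 1, st.2.2)
            else st) st := by
  intro l
  induction l with
  | nil => intro st hlen; rfl
  | cons i t ih =>
    intro st hlen
    simp only [List.foldl_cons]
    by_cases hv : st.1.getD i 0 = 0
    · have hvt : (st.1.getD i 0 == 0) = true := beq_iff_eq.mpr hv
      have hM : (st.1.set i 1).count 0 ≤ n := by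
        calc (st.1.set i 1).count 0 ≤ (st.1.set i 1).length := List.count_le_length
        _ = n := by simp [hlen]
      have h1 := pv_sim adj modules n Hadj n ((adj.getD i []).length)
        (st.1.set i 1, st.2.1.set i 1, st.2.2) i 0 [modules.getD i ""] [] n
        (by simpa using hlen) (by simp) hM hM
      rw [List.drop_zero] at h1
      have hmu : (st.1.set i 1).count 0 * ((adj.map List.length).sum + 3) +
          ([((i : Nat), (0 : Nat), [modules.getD i ""])].map
            (fun f => (adj.getD f.1 []).length + 1 - f.2.1)).sum + 1
          < (n + 1) * ((adj.map List.length).sum + 3) := by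
        have hmul : (st.1.set i 1).count 0 * ((adj.map List.length).sum + 3)
            ≤ n * ((adj.map List.length).sum + 3) :=
          Nat.mul_le_mul_right _ hM
        have hb := pv_getD_len_le adj i
        have hnk : (n + 1) * ((adj.map List.length).sum + 3)
            = n * ((adj.map List.length).sum + 3) + ((adj.map List.length).sum + 3) := by
          ring
        simp only [List.map_cons, List.map_nil, List.sum_cons, List.sum_nil]
        omega
      have hstep : pvRunB adj modules ((n + 1) * ((adj.map List.length).sum + 3))
          [(i, 0, [modules.getD i ""])]
          (st.1.set i 1, st.2.1.set i 1, st.2.2)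
          = pvDfsR adj modules (n + 1) i [modules.getD i ""] st := by
        rw [pv_fuel adj modules _ _ _ (by simpa using hmu), h1, pvRunW.eq_1]
        exact (pv_dfsR_eq_finR adj modules n i _ st).symm
      rw [if_pos hvt, if_pos hvt, hstep]
      exact ih _ (by rw [(pv_dfsR_inv adj modules (n + 1) i _ st).1, hlen])
    · have hvb : ¬ ((st.1.getD i 0 == 0) = true) := by simpa using hv
      rw [if_neg hvb, if_neg hvb]
      exact ih st hlen

theorem pv_cyclesR_eq_machine (adj : List (List Nat)) (modules : List String) (n : Nat)
    (Hadj : ∀ (node j : Nat), j ∈ adj.getD node [] → j < n) :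
    pvCyclesR adj modules n = pvCyclesB adj modules n := by
  unfold pvCyclesR pvCyclesB
  rw [pv_driver_eq adj modules n Hadj _ _ (by simp)]

-- ----- cycle-breaking equality (weakest link) -----

theorem pv_scanfold {α : Type} (key : α → Nat) :
    ∀ (es : List α) (b : α),
    es.foldl (fun (acc : Option Nat × α) e =>
        if (match acc.1 with | none => true | some v => decide (key e < v))
        then (some (key e), e) else acc) (some (key b), b)
      = (some (key (es.foldl (fun m x => if key x < key m then x else m) b)),
         es.foldl (fun m x => if key x < key m then x else m) b) := by
  intro es
  induction es with
  | nil => intro b; rfl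
  | cons e es ih =>
    intro b
    simp only [List.foldl_cons]
    by_cases h : key e < key b <;> simp [h, ih]

theorem pv_min?_cons {α : Type} (key : α → Nat) :
    ∀ (es : List α) (e : α),
    PySem.List.min? (e :: es) key
      = some (es.foldl (fun m x => if key x < key m then x else m) e) := by
  intro es
  induction es with
  | nil => intro e; rfl
  | cons e' es ih =>
    intro e
    have h1 : PySem.List.min? (e :: e' :: es) key
        = PySem.List.min? ((if key e' < key e then e' else e) :: es) key := by
      simp only [PySem.List.min?, List.foldl_cons]
      congr 1
      split <;> rfl
    rw [h1, ih]
    simp only [List.foldl_cons]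

theorem pv_scan_eq_min {α : Type} (key : α → Nat) (es : List α) (w0 : α) (he : es ≠ []) :
    (es.foldl (fun (acc : Option Nat × α) e =>
        if (match acc.1 with | none => true | some v => decide (key e < v))
        then (some (key e), e) else acc) (none, w0)).2
      = (PySem.List.min? es key).getD w0 := by
  cases es with
  | nil => exact absurd rfl he
  | cons e es =>
    simp only [List.foldl_cons]
    simp only [if_true]
    rw [pv_scanfold, pv_min?_cons]
    rfl

theorem pv_edges_eq (cycle : List String) (hc : cycle ≠ []) :
    (List.range cycle.length).map (fun i =>
        (cycle.getD i "", cycle.getD ((i + 1) % cycle.length) ""))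
      = cycle.zip (PySem.List.slice cycle (some 1) none ++ PySem.List.slice cycle none (some 1)) := by
  have hlen : 0 < cycle.length := List.length_pos_iff.mpr hc
  rw [PySem.List.slice_from cycle (by norm_num), PySem.List.slice_to cycle (by norm_num)]
  apply List.ext_getElem
  · simp; omega
  · intro i h1 h2
    have hi : i < cycle.length := by simpa using h1
    simp only [List.getElem_map, List.getElem_range, List.getElem_zip, Prod.mk.injEq]
    refine ⟨List.getD_eq_getElem _ _ hi, ?_⟩
    by_cases hlast : i + 1 < cycle.length
    · rw [Nat.mod_eq_of_lt hlast]
      rw [List.getD_eq_getElem _ _ hlast]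
      rw [List.getElem_append_left (by simp; omega)]
      rw [List.getElem_drop]
      congr 1
      omega
    · have h0 : (i + 1) % cycle.length = 0 := by
        have : i + 1 = cycle.length := by omega
        simp [this]
      rw [h0]
      rw [List.getD_eq_getElem _ _ hlen]
      rw [List.getElem_append_right (by simp; omega)]
      rw [List.getElem_take]
      congr 1
      simp
      omega

theorem pv_break_eq (d : PySem.Dict String (List String)) (cycle : List String)
    (hc : cycle ≠ []) : pvBreakA d cycle = pvBreakB d cycle := by
  have hmap := pv_edges_eq cycle hc
  have helen : cycle.zip (PySem.List.slice cycle (some 1) none ++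
      PySem.List.slice cycle none (some 1)) ≠ [] := by
    rw [← hmap]
    simp only [ne_eq, List.map_eq_nil_iff, List.range_eq_nil]
    have := List.length_pos_iff.mpr hc
    omega
  obtain ⟨w, hw⟩ : ∃ w, PySem.List.min? (cycle.zip (PySem.List.slice cycle (some 1) none ++
      PySem.List.slice cycle none (some 1)))
      (fun e => (d.getD e.1 []).length) = some w := by
    cases hmin : PySem.List.min? (cycle.zip (PySem.List.slice cycle (some 1) none ++
        PySem.List.slice cycle none (some 1))) (fun e => (d.getD e.1 []).length) with
    | none => exact absurd ((PySem.List.min?_eq_none_iff _ _).mp hmin) helen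
    | some w => exact ⟨w, rfl⟩
  have hAB : (((List.range cycle.length).map (fun i =>
        (cycle.getD i "", cycle.getD ((i + 1) % cycle.length) ""))).foldl
      (fun (acc : Option Nat × String × String) e =>
        if (match acc.1 with
          | none => true
          | some v => decide ((d.getD e.1 []).length < v))
        then (some ((d.getD e.1 []).length), e) else acc)
      (none, cycle.getD 0 "", cycle.getD 1 ""))
    = ((List.range cycle.length).foldl
      (fun (acc : Option Nat × String × String) i =>
        let fm := cycle.getD i ""
        let tm := cycle.getD ((i + 1) % cycle.length) ""
        let count := (d.getD fm []).length
        let take := match acc.1 with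
          | none => true
          | some v => decide (count < v)
        if take then (some count, fm, tm) else acc)
      (none, cycle.getD 0 "", cycle.getD 1 "")) := List.foldl_map
  have hscan := pv_scan_eq_min (fun e : String × String => (d.getD e.1 []).length)
    (cycle.zip (PySem.List.slice cycle (some 1) none ++ PySem.List.slice cycle none (some 1)))
    (cycle.getD 0 "", cycle.getD 1 "") helen
  rw [hmap] at hAB
  rw [hw] at hscan
  simp only [pvBreakA, pvBreakB, hw]
  rw [← hAB] at *
  simp only at hscan
  rw [hscan]
  simp

-- ===== VERDICT (by name: the statement is the Claim_ definition above) =====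
theorem resolve_circular_dependencies_py_spec : Claim_equal_resolve_circular_dependencies_py := by
  intro mi _hdom hpre
  unfold Spec_resolve_circular_dependencies_py
  unfold resolve_circular_dependencies_py resolve_circular_dependencies_py_alt
  simp only [pv_idx_BA, List.length_map]
  have hpre' : (mi.map Prod.fst).Nodup := hpre
  have hadj : ∀ node, node < mi.length →
      (pvAdjB (pvBuildIdxA (mi.map Prod.fst)) mi).getD node []
        = (List.range mi.length).filter (fun j =>
            ((pvMatrixA (pvBuildIdxA (mi.map Prod.fst)) mi.length mi).getD node
              []).getD j 0 == 1) := by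
    intro node hn
    exact pv_adj_eq mi hpre' node hn
  have Hadj : ∀ (node j : Nat),
      j ∈ (pvAdjB (pvBuildIdxA (mi.map Prod.fst)) mi).getD node [] → j < mi.length := by
    intro node j hj
    by_cases hn : node < mi.length
    · rw [hadj node hn] at hj
      exact List.mem_range.mp (List.mem_of_mem_filter hj)
    · rw [List.getD_eq_default _ _ (by simpa [pvAdjB] using Nat.le_of_not_lt hn)] at hj
      simp at hj
  rw [← pv_cyclesR_eq_machine _ _ _ Hadj]
  rw [← pv_cycles_eq _ _ _ _ hadj]
  congr 1
  apply PySem.List.foldl_congr_mem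
  intro acc c hc
  refine pv_break_eq acc c ?_
  have := pv_cycles_ne (pvAdjB (pvBuildIdxA (mi.map Prod.fst)) mi) (mi.map Prod.fst) mi.length
  rw [← pv_cycles_eq _ _ _ _ hadj] at this
  exact this c hc
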